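-- pv_equiv track=rewrite | github.com/SwiftCoat/AIDA_Software | MFC_Digital.py | parsereturn
-- ===== SOURCE A (Python) =====
-- def parsereturn(ret):
--     s, r = '', ''
--     flag = False
--
--     for a in str(ret):
--         s += a
--         if flag:
--             if a == '\'':
--                 break
--             r += a
--         if '\\x02' in s:
--             flag = True
--
--     return r
-- ===== SOURCE B (Python) =====
-- def parsereturn(ret):
--     s = str(ret)
--     i = s.find('\\x02')
--     if i == -1:
--         return ''
--     rest = s[i + 4:]
--     j = rest.find('\'')
--     return rest if j == -1 else rest[:j]
-- ===== Notes on version B (the rewrite author's own statement) =====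
-- stated objective: faster
-- what changed: Replaces A's char-by-char loop that re-scans the whole growing prefix for the marker on every iteration with a single str.find for the marker, a slice after it, and one find/slice for the terminating quote.
import Mathlib
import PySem

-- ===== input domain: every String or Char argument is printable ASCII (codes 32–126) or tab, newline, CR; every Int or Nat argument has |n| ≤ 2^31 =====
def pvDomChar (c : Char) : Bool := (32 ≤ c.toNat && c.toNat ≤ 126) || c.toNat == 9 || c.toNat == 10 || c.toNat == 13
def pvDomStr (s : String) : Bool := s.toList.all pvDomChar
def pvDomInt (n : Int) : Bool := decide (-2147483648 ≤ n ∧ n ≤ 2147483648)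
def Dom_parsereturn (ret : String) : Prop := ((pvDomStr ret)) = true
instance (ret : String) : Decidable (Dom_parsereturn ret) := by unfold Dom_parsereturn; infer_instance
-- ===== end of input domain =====

-- B replaces A's quadratic loop (substring test on a growing prefix at every step)
-- by str.find for the marker and one slice up to the next quote; a timing run measures the speed-up.


-- the four-character sequence the Python literal '\\x02' denotes
def pvMarker : List Char := ['\\', 'x', '0', '2']

-- ===== PORT A =====
-- the for-loop of A: state (s = consumed prefix, r = collected output, flag); break returns r
def parsereturnLoop : List Char → List Char → List Char → Bool → List Char
  | [], _, r, _ => r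
  | a :: rest, s, r, flag =>
    let s' := s ++ [a]
    if flag then
      if a = '\'' then r
      else
        parsereturnLoop rest s' (r ++ [a])
          (if PySem.Chars.isIn pvMarker s' then true else flag)
    else
      parsereturnLoop rest s' r (if PySem.Chars.isIn pvMarker s' then true else flag)

def parsereturn (ret : String) : String :=
  String.ofList (parsereturnLoop ret.toList [] [] false)

-- ===== PORT B =====
def parsereturn_alt (ret : String) : String :=
  let s := ret.toList
  let i := PySem.Chars.find s pvMarker
  if i = -1 then ""
  else
    let rest := PySem.Chars.slice s (some (i + 4)) none
    let j := PySem.Chars.find rest ['\'']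
    if j = -1 then String.ofList rest
    else String.ofList (PySem.Chars.slice rest none (some j))

-- ===== PRECONDITION & SPEC =====
def Spec_parsereturn (ret : String) (out : String) : Prop := out = parsereturn_alt ret
instance (ret : String) (out : String) : Decidable (Spec_parsereturn ret out) := by unfold Spec_parsereturn; infer_instance

-- ===== CLAIM (what is proved, stated in full; the proofs are below) =====
def Claim_equal_parsereturn : Prop := ∀ (ret : String), Dom_parsereturn ret → Spec_parsereturn ret (parsereturn ret)

-- ===== LEMMAS AND PROOFS =====

lemma singleton_prefix_iff_head (c : Char) (l : List Char) :
    ([c] <+: l) ↔ l.head? = some c := by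
  cases l <;> simp [List.prefix_cons_iff, eq_comm]

lemma takeWhile_eq_take_of_first (P : Char → Bool) (cs : List Char) (j : Nat)
    (h1 : ∀ i, i < j → (hij : i < cs.length) → P cs[i])
    (hj : j < cs.length) (h2 : ¬ P cs[j]) : cs.takeWhile P = cs.take j := by
  induction cs generalizing j with
  | nil => simp at hj
  | cons a t ih =>
    cases j with
    | zero => simp at h2; simp [h2]
    | succ j =>
      have ha : P a := h1 0 (Nat.succ_pos _) (by simp)
      simp only [List.takeWhile_cons, ha, if_true, List.take_succ_cons]
      rw [ih j (fun i hi hij => h1 (i+1) (by omega) (by simpa)) (by simpa using hj)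
        (by simpa using h2)]

-- find cs [c] then slice is takeWhile (· ≠ c)
lemma find_quote_slice (cs : List Char) (c : Char) :
    (if PySem.Chars.find cs [c] = -1 then cs
     else PySem.Chars.slice cs none (some (PySem.Chars.find cs [c])))
      = cs.takeWhile (· ≠ c) := by
  by_cases h : PySem.Chars.find cs [c] = -1
  · rw [if_pos h]
    have : ¬ [c] <:+: cs := (PySem.Chars.find_eq_neg_one_iff _ _).mp h
    rw [List.singleton_infix_iff] at this
    exact (List.takeWhile_eq_self_iff.mpr (fun x hx => by
      simp only [decide_eq_true_eq]; rintro rfl; exact this hx)).symm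
  · rw [if_neg h]
    have h0 : 0 ≤ PySem.Chars.find cs [c] := by
      have := PySem.Chars.neg_one_le_find cs [c]; omega
    obtain ⟨hpre, hmin⟩ := PySem.Chars.find_spec (s := cs) (sub := [c]) h0
    set j := (PySem.Chars.find cs [c]).toNat with hjdef
    rw [PySem.Chars.slice_eq_listSlice, PySem.List.slice_to _ h0]
    have hjc : cs[j]? = some c := by
      rw [singleton_prefix_iff_head, List.head?_drop] at hpre; exact hpre
    have hjlt : j < cs.length := List.getElem?_eq_some_iff.mp hjc |>.1
    rw [takeWhile_eq_take_of_first (· ≠ c) cs j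
      (fun i hi hil => by
        have := hmin i hi
        rw [singleton_prefix_iff_head, List.head?_drop] at this
        simp only [decide_eq_true_eq]
        intro hcc; exact this (by rw [List.getElem?_eq_getElem hil, hcc])
      ) hjlt (by simp [List.getElem?_eq_some_iff.mp hjc |>.2])]

-- once flag is true, the loop collects chars up to (excluding) the first quote
lemma loop_flag_true (rest s r : List Char) :
    parsereturnLoop rest s r true = r ++ rest.takeWhile (· ≠ '\'') := by
  induction rest generalizing s r with
  | nil => simp [parsereturnLoop]
  | cons a t ih =>
    simp only [parsereturnLoop, List.takeWhile_cons]
    by_cases ha : a = '\''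
    · simp [ha]
    · have hf : (if PySem.Chars.isIn pvMarker (s ++ [a]) then true else true) = true := by
        split <;> rfl
      simp only [hf, ha, if_true, if_false, ih]
      simp [ha]

-- occurrence confined to the left part of an append
lemma prefix_drop_left (u v w : List Char) (j : Nat) (h : u <+: (v ++ w).drop j)
    (hl : j + u.length ≤ v.length) : u <+: v.drop j := by
  rw [List.drop_append_of_le_length (by omega)] at h
  exact (List.isPrefix_append_of_length (by simp; omega)).mp h

lemma prefix_drop_infix (u l : List Char) (j : Nat) (h : u <+: l.drop j) : u <:+: l :=
  h.isInfix.trans (l.drop_suffix j).isInfix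

-- find points at the first occurrence: uniqueness
lemma find_eq_of_first (cs sub : List Char) (k : Nat) (h1 : sub <+: cs.drop k)
    (h2 : ∀ j < k, ¬ sub <+: cs.drop j) : PySem.Chars.find cs sub = k := by
  have hin : sub <:+: cs := prefix_drop_infix _ _ _ h1
  have hne : PySem.Chars.find cs sub ≠ -1 := (PySem.Chars.find_ne_neg_one_iff _ _).mpr hin
  have h0 : 0 ≤ PySem.Chars.find cs sub := by
    have := PySem.Chars.neg_one_le_find cs sub; omega
  obtain ⟨hpre, hmin⟩ := PySem.Chars.find_spec (s := cs) (sub := sub) h0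
  have hk1 : ¬ (PySem.Chars.find cs sub).toNat < k := fun hlt => h2 _ hlt hpre
  have hk2 : ¬ k < (PySem.Chars.find cs sub).toNat := fun hlt => hmin k hlt h1
  omega

-- phase 1: marker not yet seen in the consumed prefix s
lemma loop_flag_false (rest s : List Char) (hs : ¬ pvMarker <:+: s) :
    parsereturnLoop rest s [] false =
      (if PySem.Chars.find (s ++ rest) pvMarker = -1 then []
       else ((s ++ rest).drop ((PySem.Chars.find (s ++ rest) pvMarker).toNat + 4)).takeWhile (· ≠ '\'')) := by
  induction rest generalizing s with
  | nil =>
    have hf : PySem.Chars.find (s ++ []) pvMarker = -1 := by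
      rw [List.append_nil]; exact (PySem.Chars.find_eq_neg_one_iff _ _).mpr hs
    rw [if_pos hf]; rfl
  | cons a t ih =>
    have hassoc : s ++ a :: t = (s ++ [a]) ++ t := by simp
    simp only [parsereturnLoop, Bool.false_eq_true, if_false]
    by_cases hb : PySem.Chars.isIn pvMarker (s ++ [a]) = true
    · -- the marker just completed at the end of s ++ [a]
      rw [if_pos (by simp [hb]), loop_flag_true]
      have hinf : pvMarker <:+: (s ++ [a]) := (PySem.Chars.isIn_iff_infix _ _).mp hb
      obtain ⟨j, hj⟩ := (PySem.Chars.exists_prefix_drop_iff_isIn pvMarker (s ++ [a])).mpr hb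
      have hjlen : j + 4 ≤ s.length + 1 := by
        have := hj.length_le; simp [pvMarker] at this; omega
      have hnotin : ∀ j', j' + 4 ≤ s.length → ∀ w, ¬ pvMarker <+: (s ++ w).drop j' := by
        intro j' hj' w hp
        exact hs (prefix_drop_infix _ _ _ (prefix_drop_left pvMarker s w j' hp (by simp [pvMarker]; omega)))
      have hjeq : j + 4 = s.length + 1 := by
        rcases Nat.lt_or_ge (j + 4) (s.length + 1) with h | h
        · exact absurd hj (hnotin j (by omega) [a])
        · omega
      obtain ⟨k, hk⟩ : ∃ k, s.length = k + 3 := ⟨j, by omega⟩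
      have hjk : j = k := by omega
      have hfind : PySem.Chars.find (s ++ a :: t) pvMarker = (k : Int) := by
        rw [hassoc]
        apply find_eq_of_first
        · rw [List.drop_append_of_le_length (by simp; omega)]
          exact (hjk ▸ hj).trans (List.prefix_append _ t)
        · intro j' hj'
          rw [show (s ++ [a]) ++ t = s ++ ([a] ++ t) by simp]
          exact hnotin j' (by omega) ([a] ++ t)
      rw [hfind]
      have : ((k : Int).toNat + 4) = ((s ++ [a]).length) := by simp [hk]
      rw [if_neg (by omega), this, hassoc, List.drop_left]
      simp
    · rw [if_neg (by simp [hb]), ih (s ++ [a]) (fun h => hb ((PySem.Chars.isIn_iff_infix _ _).mpr h)), hassoc]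
-- ===== VERDICT (by name: the statement is the Claim_ definition above) =====
theorem parsereturn_spec : Claim_equal_parsereturn := by
  intro ret _
  unfold Spec_parsereturn parsereturn parsereturn_alt
  rw [loop_flag_false ret.toList [] (by simp [pvMarker]), List.nil_append]
  by_cases h : PySem.Chars.find ret.toList pvMarker = -1
  · simp [h]
  · have h0 : 0 ≤ PySem.Chars.find ret.toList pvMarker := by
      have := PySem.Chars.neg_one_le_find ret.toList pvMarker; omega
    simp only [if_neg h]
    have hcast : PySem.Chars.find ret.toList pvMarker + 4 =
        (((PySem.Chars.find ret.toList pvMarker).toNat + 4 : Nat) : Int) := by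
      push_cast; omega
    rw [hcast, PySem.Chars.slice_eq_listSlice, PySem.List.slice_from_natCast]
    rw [← apply_ite String.ofList, find_quote_slice]
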